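-- pv_equiv track=rewrite | github.com/VTacius/ESBackup | elastica/almacenamiento.py | listar_directorios_previos
-- ===== SOURCE A (Python) =====
-- def listar_directorios_previos(directorio):
--     '''
--     Dado un directorio, forma una lista de los directorios previos posibles
--     '''
--     componentes = [ x for x in directorio.split('/') if x != '' ]
--     a = []
--     b = '/'
--     for x in componentes:
--         b += x + '/'
--         a.append(b)
--
--     return a
-- ===== SOURCE B (Python) =====
-- def listar_directorios_previos(directorio):
--     '''
--     Dado un directorio, forma una lista de los directorios previos posibles
--     '''
--     componentes = [x for x in directorio.split('/') if x != '']
--     return ['/' + '/'.join(componentes[:i + 1]) + '/' for i in range(len(componentes))]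
-- ===== Notes on version B (the rewrite author's own statement) =====
-- stated objective: alternative
-- what changed: A threads a growing accumulator string through a loop, appending each cumulative path; B builds each cumulative path independently by joining a slice of the component list for each index (direct per-index construction instead of accumulator passing).
import Mathlib
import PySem

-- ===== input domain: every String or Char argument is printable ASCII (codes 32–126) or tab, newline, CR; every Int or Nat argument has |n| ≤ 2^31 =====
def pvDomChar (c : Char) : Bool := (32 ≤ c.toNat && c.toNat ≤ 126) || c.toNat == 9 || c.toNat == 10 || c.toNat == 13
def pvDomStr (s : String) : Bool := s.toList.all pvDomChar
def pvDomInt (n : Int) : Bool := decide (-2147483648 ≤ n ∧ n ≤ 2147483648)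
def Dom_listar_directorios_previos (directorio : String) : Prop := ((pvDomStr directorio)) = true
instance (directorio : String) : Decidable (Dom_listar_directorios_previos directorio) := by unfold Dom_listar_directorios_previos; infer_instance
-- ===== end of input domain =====

-- B rebuilds each cumulative path directly by joining a slice of the component
-- list per index, instead of A's accumulator string threaded through the loop.

-- ===== PORT A =====
-- accumulator loop: b starts at "/", each step b += x + "/" and b is appended to a
def listar_directorios_previos (directorio : String) : List String :=
  let componentes := ((PySem.Str.split? directorio "/").getD []).filter (fun x => decide (x ≠ ""))
  (componentes.foldl
    (fun (st : List String × String) x =>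
      let b := PySem.Str.join "" [st.2, x, "/"]   -- b += x + '/'
      (st.1 ++ [b], b))
    ([], "/")).1

-- ===== PORT B =====
-- each element built independently: '/' + '/'.join(componentes[:i+1]) + '/'
def listar_directorios_previos_alt (directorio : String) : List String :=
  let componentes := ((PySem.Str.split? directorio "/").getD []).filter (fun x => decide (x ≠ ""))
  (PySem.List.pyRange 0 componentes.length 1).map (fun i =>
    PySem.Str.join "" ["/", PySem.Str.join "/" (PySem.List.slice componentes none (some (i + 1))), "/"])

-- ===== PRECONDITION & SPEC =====
def Spec_listar_directorios_previos (directorio : String) (out : List String) : Prop := out = listar_directorios_previos_alt directorio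
instance (directorio : String) (out : List String) : Decidable (Spec_listar_directorios_previos directorio out) := by unfold Spec_listar_directorios_previos; infer_instance

-- ===== CLAIM (what is proved, stated in full; the proofs are below) =====
def Claim_equal_listar_directorios_previos : Prop := ∀ (directorio : String), Dom_listar_directorios_previos directorio → Spec_listar_directorios_previos directorio (listar_directorios_previos directorio)

-- ===== LEMMAS AND PROOFS =====

-- the character sequence of the cumulative path over a list of components (without the leading '/')
def pvFlat (l : List (List Char)) : List Char := l.flatMap (fun x => x ++ ['/'])

theorem pvJoinFlat (x : List Char) (t : List (List Char)) :
    PySem.Chars.join ['/'] (x :: t) ++ ['/'] = pvFlat (x :: t) := by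
  induction t generalizing x with
  | nil => simp [PySem.Chars.join_singleton, pvFlat]
  | cons y t ih =>
      rw [PySem.Chars.join_cons_cons]
      simp only [pvFlat, List.flatMap_cons] at *
      simp [← ih y, List.append_assoc]

theorem pvJoinThree (b x : String) :
    (PySem.Str.join "" [b, x, "/"]).toList = b.toList ++ x.toList ++ ['/'] := by
  simp [PySem.Str.toList_join, PySem.Chars.join_cons_cons, PySem.Chars.join_singleton]

-- characterisation of A's accumulator loop
theorem pvALoop (comps : List String) (a : List String) (b : String) :
    ((comps.foldl
        (fun (st : List String × String) x =>
          let b := PySem.Str.join "" [st.2, x, "/"]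
          (st.1 ++ [b], b))
        (a, b)).1).map String.toList
    = a.map String.toList ++ (List.range comps.length).map
        (fun i => b.toList ++ pvFlat ((comps.map String.toList).take (i + 1))) := by
  induction comps generalizing a b with
  | nil => simp
  | cons x xs ih =>
      simp only [List.foldl_cons]
      rw [ih]
      simp only [List.length_cons, List.range_succ_eq_map, List.map_cons, List.map_map,
        List.map_append, List.map_cons, List.map_nil, pvJoinThree, List.take_succ_cons,
        pvFlat, List.flatMap_cons, List.take_zero, List.flatMap_nil]
      simp [Function.comp, List.append_assoc]

theorem pvB (comps : List String) :
    ((PySem.List.pyRange 0 comps.length 1).map (fun i =>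
        PySem.Str.join "" ["/", PySem.Str.join "/" (PySem.List.slice comps none (some (i + 1))), "/"])).map String.toList
    = (List.range comps.length).map
        (fun i => "/".toList ++ pvFlat ((comps.map String.toList).take (i + 1))) := by
  have hr : PySem.List.pyRange 0 (comps.length : Int) 1
      = (List.range comps.length).map (fun (k : Nat) => (k : Int)) := by
    rw [PySem.List.pyRange_one]
    norm_num
  rw [hr, List.map_map, List.map_map]
  apply List.map_congr_left
  intro i hi
  rw [List.mem_range] at hi
  have hslice : PySem.List.slice comps none (some ((i : Int) + 1)) = comps.take (i + 1) := by
    have := PySem.List.slice_to_natCast comps (i + 1)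
    push_cast at this
    simpa using this
  simp only [Function.comp, hslice]
  rw [pvJoinThree]
  have hne : (comps.map String.toList).take (i + 1) ≠ [] := by
    apply List.ne_nil_of_length_pos
    simp
    omega
  obtain ⟨y, t, hyt⟩ := List.exists_cons_of_ne_nil hne
  simp only [PySem.Str.toList_join, List.map_take, List.append_assoc,
    List.append_cancel_left_eq]
  rw [show ("/" : String).toList = ['/'] by decide, hyt]
  exact pvJoinFlat y t

-- ===== VERDICT (by name: the statement is the Claim_ definition above) =====
theorem listar_directorios_previos_spec : Claim_equal_listar_directorios_previos := by
  intro directorio _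
  unfold Spec_listar_directorios_previos listar_directorios_previos listar_directorios_previos_alt
  apply List.map_injective_iff.mpr (fun s t h => String.toList_inj.mp h)
  rw [pvALoop, pvB]
  simp
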